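-- pv_equiv track=rewrite | github.com/SweetDemonLord/Exercises | exChapter5/ex5.1.py | merge_texts
-- ===== SOURCE A (Python) =====
-- def merge_texts(text1, text2):
--     # Получаем длины введенных текстов
--     len1, len2 = len(text1), len(text2)
--     result = []
--
--     # Итерируемся по максимальной длине текстов
--     for i in range(max(len1, len2)):
--         if i < len1:
--             result.append(text1[i])  # Добавляем букву из первого текста
--         else:
--             result.append('*')  # Если первый текст закончился, добавляем '*'
--
--         if i < len2:
--             result.append(text2[i])  # Добавляем букву из второго текста
--         else:
--             result.append('*')  # Если второй текст закончился, добавляем '*'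
--
--     return ''.join(result)  # Объединяем список символов в строку
-- ===== SOURCE B (Python) =====
-- def merge_texts(text1, text2):
--     n = max(len(text1), len(text2))
--     out = ['*'] * (2 * n)
--     out[0:2 * len(text1):2] = text1
--     out[1:2 * len(text2):2] = text2
--     return ''.join(out)
-- ===== Notes on version B (the rewrite author's own statement) =====
-- stated objective: alternative
-- what changed: Instead of interleaving per position, B preallocates a '*'-filled buffer of length 2*max and writes each input string wholesale into its own stride (even/odd slots) via strided slice assignment.
import Mathlib
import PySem

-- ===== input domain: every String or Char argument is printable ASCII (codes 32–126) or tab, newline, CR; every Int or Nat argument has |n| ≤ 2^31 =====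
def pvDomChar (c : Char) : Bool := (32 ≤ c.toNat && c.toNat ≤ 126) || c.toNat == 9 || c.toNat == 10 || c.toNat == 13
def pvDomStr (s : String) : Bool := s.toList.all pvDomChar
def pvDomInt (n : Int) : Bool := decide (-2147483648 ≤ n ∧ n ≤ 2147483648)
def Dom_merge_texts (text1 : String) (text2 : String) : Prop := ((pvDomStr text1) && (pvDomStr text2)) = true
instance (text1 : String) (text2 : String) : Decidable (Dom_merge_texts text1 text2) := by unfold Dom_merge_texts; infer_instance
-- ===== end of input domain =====

-- B replaces A's per-index conditional interleave by a preallocated '*' buffer of length 2n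
-- written with two strided slice assignments (even/odd positions); objective: alternative.


-- ===== PORT A =====
def merge_texts (text1 : String) (text2 : String) : String :=
  String.mk ((List.range (max text1.toList.length text2.toList.length)).foldl
    (fun acc i =>
      (acc ++ [if h : i < text1.toList.length then text1.toList[i] else '*'])
        ++ [if h : i < text2.toList.length then text2.toList[i] else '*'])
    [])

-- ===== PORT B =====
-- out[start:start+2*len(l):2] = l : write l's characters at start, start+2, … (sequential strided write)
def writeStride : List Char → Nat → List Char → List Char
  | buf, _, [] => buf
  | buf, s, c :: l => writeStride (buf.set s c) (s + 2) l

def merge_texts_alt (text1 : String) (text2 : String) : String :=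
  let n := max text1.toList.length text2.toList.length
  String.mk (writeStride (writeStride (List.replicate (2 * n) '*') 0 text1.toList) 1 text2.toList)

-- ===== PRECONDITION & SPEC =====
def Spec_merge_texts (text1 : String) (text2 : String) (out : String) : Prop := out = merge_texts_alt text1 text2
instance (text1 : String) (text2 : String) (out : String) : Decidable (Spec_merge_texts text1 text2 out) := by unfold Spec_merge_texts; infer_instance

-- ===== CLAIM (what is proved, stated in full; the proofs are below) =====
def Claim_equal_merge_texts : Prop := ∀ (text1 : String) (text2 : String), Dom_merge_texts text1 text2 → Spec_merge_texts text1 text2 (merge_texts text1 text2)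

-- ===== LEMMAS AND PROOFS =====

-- canonical interleaving, the common reference point of both ports
def itl : List Char → List Char → List Char
  | [], [] => []
  | a :: l1, [] => a :: '*' :: itl l1 []
  | [], b :: l2 => '*' :: b :: itl [] l2
  | a :: l1, b :: l2 => a :: b :: itl l1 l2

theorem dite_eq_getD (l : List Char) (i : Nat) :
    (if h : i < l.length then l[i] else '*') = l.getD i '*' := by
  by_cases h : i < l.length
  · simp [h, List.getD]
  · simp [h, List.getD]

theorem foldl_range_flatMap (f : Nat → List Char) (n : Nat) (acc : List Char) :
    (List.range n).foldl (fun a i => a ++ f i) acc = acc ++ (List.range n).flatMap f := by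
  induction n generalizing acc with
  | zero => simp
  | succ n ih => simp [List.range_succ, ih]

theorem flatMap_left_nil (l : List Char) :
    (List.range l.length).flatMap (fun i => ['*', l.getD i '*']) = itl [] l := by
  induction l with
  | nil => simp [itl]
  | cons b l ih =>
    simp only [List.length_cons, List.range_succ_eq_map, List.flatMap_cons, List.flatMap_map]
    simpa [itl, Function.comp, List.getD] using ih

theorem flatMap_right_nil (l : List Char) :
    (List.range l.length).flatMap (fun i => [l.getD i '*', '*']) = itl l [] := by
  induction l with
  | nil => simp [itl]
  | cons a l ih =>
    simp only [List.length_cons, List.range_succ_eq_map, List.flatMap_cons, List.flatMap_map]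
    simpa [itl, Function.comp, List.getD] using ih

theorem a_side (l1 l2 : List Char) :
    (List.range (max l1.length l2.length)).flatMap
      (fun i => [l1.getD i '*', l2.getD i '*']) = itl l1 l2 := by
  induction l1 generalizing l2 with
  | nil =>
    cases l2 with
    | nil => simp [itl]
    | cons b l2 =>
      simpa using flatMap_left_nil (b :: l2)
  | cons a l1 ih =>
    cases l2 with
    | nil =>
      simpa using flatMap_right_nil (a :: l1)
    | cons b l2 =>
      have hm : max (a :: l1).length (b :: l2).length = max l1.length l2.length + 1 := by
        simp [Nat.succ_max_succ]
      rw [hm, List.range_succ_eq_map]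
      simp only [List.flatMap_cons, List.flatMap_map]
      simpa [itl, Function.comp, List.getD] using ih l2

-- a strided write starting at s+2 leaves the first two cells alone
theorem writeStride_shift (l : List Char) (a b : Char) (buf : List Char) (s : Nat) :
    writeStride (a :: b :: buf) (s + 2) l = a :: b :: writeStride buf s l := by
  induction l generalizing a b buf s with
  | nil => simp [writeStride]
  | cons c l ih =>
    show writeStride ((a :: b :: buf).set (s + 2) c) (s + 2 + 2) l = _
    simp only [List.set]
    rw [ih]
    rfl

theorem writeStride_odd (l : List Char) :
    writeStride (List.replicate (2 * l.length) '*') 1 l = itl [] l := by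
  induction l with
  | nil => simp [writeStride, itl]
  | cons b l ih =>
    have h2 : 2 * (b :: l).length = 2 * l.length + 1 + 1 := by simp; ring
    rw [h2, List.replicate_succ, List.replicate_succ]
    show writeStride (('*' :: '*' :: List.replicate (2 * l.length) '*').set 1 b) (1 + 2) l = _
    simp only [List.set]
    rw [writeStride_shift, ih]
    simp [itl]

theorem writeStride_even (l : List Char) :
    writeStride (List.replicate (2 * l.length) '*') 0 l = itl l [] := by
  induction l with
  | nil => simp [writeStride, itl]
  | cons a l ih =>
    have h2 : 2 * (a :: l).length = 2 * l.length + 1 + 1 := by simp; ring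
    rw [h2, List.replicate_succ, List.replicate_succ]
    show writeStride (('*' :: '*' :: List.replicate (2 * l.length) '*').set 0 a) (0 + 2) l = _
    simp only [List.set]
    rw [writeStride_shift, ih]
    simp [itl]

theorem b_side (l1 l2 : List Char) :
    writeStride (writeStride (List.replicate (2 * max l1.length l2.length) '*') 0 l1) 1 l2
      = itl l1 l2 := by
  induction l1 generalizing l2 with
  | nil =>
    simpa [writeStride] using writeStride_odd l2
  | cons a l1 ih =>
    cases l2 with
    | nil =>
      show writeStride (List.replicate (2 * (a :: l1).length) '*') 0 (a :: l1) = _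
      exact writeStride_even (a :: l1)
    | cons b l2 =>
      have hm : 2 * max (a :: l1).length (b :: l2).length
          = 2 * max l1.length l2.length + 1 + 1 := by
        simp [Nat.succ_max_succ]; ring
      rw [hm, List.replicate_succ, List.replicate_succ]
      show writeStride
        (writeStride (('*' :: '*' :: List.replicate (2 * max l1.length l2.length) '*').set 0 a)
          (0 + 2) l1) 1 (b :: l2) = _
      simp only [List.set]
      rw [writeStride_shift]
      show writeStride ((a :: '*' :: writeStride (List.replicate (2 * max l1.length l2.length) '*') 0 l1).set 1 b) (1 + 2) l2 = _
      simp only [List.set]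
      rw [writeStride_shift, ih]
      simp [itl]

-- ===== VERDICT (by name: the statement is the Claim_ definition above) =====
theorem merge_texts_spec : Claim_equal_merge_texts := by
  intro text1 text2 _
  show _ = _
  unfold merge_texts merge_texts_alt
  simp only [List.append_assoc, List.singleton_append]
  rw [foldl_range_flatMap (fun i =>
    [if h : i < text1.toList.length then text1.toList[i] else '*',
     if h : i < text2.toList.length then text2.toList[i] else '*'])]
  simp only [List.nil_append]
  rw [b_side]
  congr 1
  simp only [dite_eq_getD]
  exact a_side text1.toList text2.toList
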